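-- pv_equiv track=rewrite | github.com/sproutsai-engg/coding_question_generator | json_files/python_codes/Q_306.py | check
-- ===== SOURCE A (Python) =====
-- def check(num1, num2, remaining):
--     if (len(num1) > 1 and num1[0] == '0') or (len(num2) > 1 and num2[0] == '0'):
--         return False
--     _sum = add(num1, num2)
--     if remaining == _sum:
--         return True
--     if not remaining.startswith(_sum):
--         return False
--     return check(num2, _sum, remaining[len(_sum):])
--
-- def add(num1, num2):
--     carry, result = 0, []
--     i, j = len(num1) - 1, len(num2) - 1
--     while i >= 0 or j >= 0 or carry > 0:
--         n1 = int(num1[i]) if i >= 0 else 0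
--         n2 = int(num2[j]) if j >= 0 else 0
--         _sum = n1 + n2 + carry
--         carry = _sum // 10
--         result.append(str(_sum % 10))
--         i, j = i - 1, j - 1
--     return ''.join(result[::-1])
-- ===== SOURCE B (Python) =====
-- def _add(a, b):
--     ra = [ord(c) - 48 for c in a[::-1]]
--     rb = [ord(c) - 48 for c in b[::-1]]
--     out = []
--     carry = 0
--     while ra or rb:
--         d = (ra.pop(0) if ra else 0) + (rb.pop(0) if rb else 0) + carry
--         out.append(d % 10)
--         carry = d // 10
--     if carry:
--         out.append(carry)
--     return ''.join(chr(48 + d) for d in reversed(out))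
--
-- def check(num1, num2, remaining):
--     a, b, rem = num1, num2, remaining
--     while True:
--         if (len(a) > 1 and a[0] == '0') or (len(b) > 1 and b[0] == '0'):
--             return False
--         s = _add(a, b)
--         if rem[:len(s)] != s:
--             return False
--         rest = rem[len(s):]
--         if rest == '':
--             return True
--         a, b, rem = b, s, rest
-- ===== Notes on version B (the rewrite author's own statement) =====
-- stated objective: alternative
-- what changed: B replaces A's recursive check (separate equality test, startswith test and slice each round) by an iterative while-loop with one fused prefix-match, and replaces A's index-based while-loop addition over the two strings by a carry recursion over reversed digit-value lists with the final carry appended once.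
import Mathlib
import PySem

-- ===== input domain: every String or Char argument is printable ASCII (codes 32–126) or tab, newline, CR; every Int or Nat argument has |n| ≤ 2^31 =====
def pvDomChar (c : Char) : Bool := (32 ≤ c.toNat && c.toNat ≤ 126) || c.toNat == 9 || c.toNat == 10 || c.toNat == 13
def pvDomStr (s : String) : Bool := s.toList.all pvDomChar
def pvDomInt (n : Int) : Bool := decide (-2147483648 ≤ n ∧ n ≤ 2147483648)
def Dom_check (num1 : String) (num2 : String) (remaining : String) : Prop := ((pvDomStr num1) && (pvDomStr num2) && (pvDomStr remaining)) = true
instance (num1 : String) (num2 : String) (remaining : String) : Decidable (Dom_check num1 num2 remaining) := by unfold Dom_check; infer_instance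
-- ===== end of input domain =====

-- B rewrites the recursive check as an iterative loop with a fused prefix-match and replaces
-- the index-based digit-addition loop by a recursion over reversed digit-value lists (objective: alternative).

-- ===== PORT A =====

-- the Int value of one digit character: A's int(num1[i]) and B's ord(c) - 48 compute the
-- same value; exact on digit chars — on any other char A's int() raises ValueError, and
-- such inputs are excluded by Pre_check.
def pvDigitVal (c : Char) : Int := (c.toNat : Int) - 48

-- the while loop of add: state (i, j, carry, result); fuel l1.length+l2.length+40 is never
-- exhausted on digit inputs (the loop runs at most max(len1,len2)+1 iterations there).
def pvAddLoopA (l1 l2 : List Char) : Int → Int → Int → List Char → Nat → List Char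
  | _, _, _, acc, 0 => acc
  | i, j, carry, acc, f+1 =>
    if i ≥ 0 || j ≥ 0 || carry > 0 then
      let n1 : Int := if i ≥ 0 then pvDigitVal (PySem.List.pyGetD l1 i '0') else 0
      let n2 : Int := if j ≥ 0 then pvDigitVal (PySem.List.pyGetD l2 j '0') else 0
      let s := n1 + n2 + carry
      let carry' := PySem.Int.floordiv s 10
      -- str(_sum % 10): _sum % 10 ∈ [0,10) always in Python, so it is one digit char (exact)
      let d : Char := Char.ofNat (48 + (PySem.Int.mod s 10).toNat)
      pvAddLoopA l1 l2 (i - 1) (j - 1) carry' (acc ++ [d]) f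
    else acc

def pvAddA (l1 l2 : List Char) : List Char :=
  (pvAddLoopA l1 l2 ((l1.length : Int) - 1) ((l2.length : Int) - 1) 0 []
    (l1.length + l2.length + 40)).reverse   -- ''.join(result[::-1])

-- the recursive check; fuel remaining.length+1: on Pre_ inputs every recursive call strictly
-- shortens remaining, so the fuel is never exhausted there.
def pvCheckA : Nat → List Char → List Char → List Char → Bool
  | 0, _, _, _ => false
  | f+1, n1, n2, rem =>
    if (decide (1 < n1.length) && (n1.head? == some '0'))
        || (decide (1 < n2.length) && (n2.head? == some '0')) then false
    else
      let s := pvAddA n1 n2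
      if rem = s then true
      else if !(PySem.Chars.startswith rem s) then false
      else pvCheckA f n2 s (PySem.List.slice rem (some (s.length : Int)) none)

def check (num1 : String) (num2 : String) (remaining : String) : Bool :=
  pvCheckA (remaining.toList.length + 1) num1.toList num2.toList remaining.toList

-- ===== PORT B =====

def pvChr (d : Int) : Char := Char.ofNat (48 + d).toNat     -- chr(48 + d); exact for -48 ≤ d

-- the while loop of _add over the two reversed value lists, plus the trailing 'if carry'
def pvAddLoopB : List Int → List Int → Int → List Int
  | [], [], carry => if carry ≠ 0 then [carry] else []
  | x :: ra, [], carry =>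
      let d := x + carry
      PySem.Int.mod d 10 :: pvAddLoopB ra [] (PySem.Int.floordiv d 10)
  | [], y :: rb, carry =>
      let d := y + carry
      PySem.Int.mod d 10 :: pvAddLoopB [] rb (PySem.Int.floordiv d 10)
  | x :: ra, y :: rb, carry =>
      let d := x + y + carry
      PySem.Int.mod d 10 :: pvAddLoopB ra rb (PySem.Int.floordiv d 10)

def pvAddB (a b : List Char) : List Char :=
  (pvAddLoopB (a.reverse.map pvDigitVal) (b.reverse.map pvDigitVal) 0).reverse.map pvChr

-- the while True loop of B's check; same fuel policy as port A
def pvCheckB : Nat → List Char → List Char → List Char → Bool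
  | 0, _, _, _ => false
  | f+1, a, b, rem =>
    if (decide (1 < a.length) && (a.head? == some '0'))
        || (decide (1 < b.length) && (b.head? == some '0')) then false
    else
      let s := pvAddB a b
      if rem.take s.length = s then
        let rest := rem.drop s.length
        if rest = [] then true else pvCheckB f b s rest
      else false

def check_alt (num1 : String) (num2 : String) (remaining : String) : Bool :=
  pvCheckB (remaining.toList.length + 1) num1.toList num2.toList remaining.toList

-- ===== PRECONDITION & SPEC =====
-- Pre_check excludes exactly the inputs where A does not return: a non-digit character in
-- num1/num2 reaching int() raises ValueError (unless the leading-zero guard fires first),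
-- and num1 = num2 = '' with nonempty remaining recurses forever (RecursionError).
def Pre_check (num1 : String) (num2 : String) (remaining : String) : Prop :=
  ((1 < num1.toList.length ∧ num1.toList.head? = some '0')
    ∨ (1 < num2.toList.length ∧ num2.toList.head? = some '0'))
  ∨ (num1.toList.all Char.isDigit ∧ num2.toList.all Char.isDigit
      ∧ (num1.toList ≠ [] ∨ num2.toList ≠ [] ∨ remaining.toList = []))
instance (num1 : String) (num2 : String) (remaining : String) : Decidable (Pre_check num1 num2 remaining) := by unfold Pre_check; infer_instance
def pvWitness_check : String × String × String := ("1", "1", "23")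

def Spec_check (num1 : String) (num2 : String) (remaining : String) (out : Bool) : Prop := out = check_alt num1 num2 remaining
instance (num1 : String) (num2 : String) (remaining : String) (out : Bool) : Decidable (Spec_check num1 num2 remaining out) := by unfold Spec_check; infer_instance

-- ===== CLAIM (what is proved, stated in full; the proofs are below) =====
def Claim_equal_check : Prop := ∀ (num1 : String) (num2 : String) (remaining : String), Dom_check num1 num2 remaining → Pre_check num1 num2 remaining → Spec_check num1 num2 remaining (check num1 num2 remaining)

-- ===== LEMMAS AND PROOFS =====

theorem isDigit_toNat {c : Char} (h : c.isDigit = true) : 48 ≤ c.toNat ∧ c.toNat ≤ 57 := by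
  simp [Char.isDigit, UInt32.le_iff_toNat_le] at h
  exact h

theorem ordVal_range {c : Char} (h : c.isDigit = true) :
    0 ≤ pvDigitVal c ∧ pvDigitVal c ≤ 9 := by
  have := isDigit_toNat h
  unfold pvDigitVal; omega

theorem pv_mod10_range (d : Int) : 0 ≤ PySem.Int.mod d 10 ∧ PySem.Int.mod d 10 < 10 :=
  ⟨PySem.Int.mod_nonneg d (by norm_num), PySem.Int.mod_lt d (by norm_num)⟩

theorem pv_carry_range (d : Int) (hd : 0 ≤ d) (hd' : d ≤ 19) :
    0 ≤ PySem.Int.floordiv d 10 ∧ PySem.Int.floordiv d 10 ≤ 1 := by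
  rw [PySem.Int.floordiv_eq_ediv_of_pos (by norm_num)]
  omega

theorem addLoopB_range_nil (rb : List Int) : ∀ (c : Int),
    (∀ x ∈ rb, 0 ≤ x ∧ x ≤ 9) → 0 ≤ c → c ≤ 1 →
    ∀ d ∈ pvAddLoopB [] rb c, 0 ≤ d ∧ d < 10 := by
  induction rb with
  | nil =>
      intro c _ hc0 hc1 d hd
      simp only [pvAddLoopB] at hd
      split at hd <;> simp at hd <;> omega
  | cons y rb ih =>
      intro c hrb hc0 hc1 d hd
      simp only [pvAddLoopB, List.mem_cons] at hd
      have hy := hrb y (by simp)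
      have hcar := pv_carry_range (y + c) (by omega) (by omega)
      rcases hd with h | h
      · have := pv_mod10_range (y + c); omega
      · exact ih _ (fun z hz => hrb z (by simp [hz])) hcar.1 hcar.2 d h

theorem addLoopB_range (ra : List Int) : ∀ (rb : List Int) (c : Int),
    (∀ x ∈ ra, 0 ≤ x ∧ x ≤ 9) → (∀ x ∈ rb, 0 ≤ x ∧ x ≤ 9) →
    0 ≤ c → c ≤ 1 →
    ∀ d ∈ pvAddLoopB ra rb c, 0 ≤ d ∧ d < 10 := by
  induction ra with
  | nil => exact fun rb c _ hrb hc0 hc1 => addLoopB_range_nil rb c hrb hc0 hc1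
  | cons x ra ih =>
      intro rb c hra hrb hc0 hc1 d hd
      have hx := hra x (by simp)
      cases rb with
      | nil =>
          simp only [pvAddLoopB, List.mem_cons] at hd
          have hcar := pv_carry_range (x + c) (by omega) (by omega)
          rcases hd with h | h
          · have := pv_mod10_range (x + c); omega
          · exact ih [] _ (fun z hz => hra z (by simp [hz])) (by simp) hcar.1 hcar.2 d h
      | cons y rb =>
          simp only [pvAddLoopB, List.mem_cons] at hd
          have hy := hrb y (by simp)
          have hcar := pv_carry_range (x + y + c) (by omega) (by omega)
          rcases hd with h | h
          · have := pv_mod10_range (x + y + c); omega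
          · exact ih rb _ (fun z hz => hra z (by simp [hz])) (fun z hz => hrb z (by simp [hz]))
              hcar.1 hcar.2 d h

theorem pvChr_isDigit {d : Int} (h0 : 0 ≤ d) (h1 : d < 10) : (pvChr d).isDigit = true := by
  unfold pvChr
  interval_cases d <;> decide

theorem addB_digits (a b : List Char)
    (ha : ∀ ch ∈ a, ch.isDigit = true) (hb : ∀ ch ∈ b, ch.isDigit = true) :
    ∀ ch ∈ pvAddB a b, ch.isDigit = true := by
  intro ch hch
  simp only [pvAddB, List.mem_map, List.mem_reverse] at hch
  obtain ⟨d, hd, rfl⟩ := hch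
  have := addLoopB_range (a.reverse.map pvDigitVal) (b.reverse.map pvDigitVal) 0
    (by rintro x hx; simp only [List.mem_map, List.mem_reverse] at hx
        obtain ⟨c, hc, rfl⟩ := hx; exact ordVal_range (ha c hc))
    (by rintro x hx; simp only [List.mem_map, List.mem_reverse] at hx
        obtain ⟨c, hc, rfl⟩ := hx; exact ordVal_range (hb c hc))
    le_rfl (by norm_num) d hd
  exact pvChr_isDigit this.1 this.2

theorem pvChr_eq (m : Int) (hm : 0 ≤ m) :
    Char.ofNat (48 + m.toNat) = pvChr m := by
  unfold pvChr
  congr 1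
  omega

theorem pv_carry_le (v c : Int) (hv0 : 0 ≤ v) (hv9 : v ≤ 9) (hc0 : 0 ≤ c) (hc1 : c ≤ 1) :
    PySem.Int.floordiv (v + c) 10 ≤ c := by
  rw [PySem.Int.floordiv_eq_ediv_of_pos (by norm_num)]
  omega

theorem addLoopAB (l1 l2 : List Char)
    (h1 : ∀ ch ∈ l1, ch.isDigit = true) (h2 : ∀ ch ∈ l2, ch.isDigit = true) :
    ∀ (f : Nat) (i j c : Int) (acc : List Char),
      i < l1.length → j < l2.length → 0 ≤ c → c ≤ 1 →
      (i+1).toNat + (j+1).toNat + c.toNat + 1 ≤ f →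
      pvAddLoopA l1 l2 i j c acc f
        = acc ++ (pvAddLoopB ((l1.take (i+1).toNat).reverse.map pvDigitVal)
                             ((l2.take (j+1).toNat).reverse.map pvDigitVal) c).map pvChr := by
  intro f
  induction f with
  | zero => intro i j c acc _ _ _ _ hf; omega
  | succ f ih =>
      intro i j c acc hi hj hc0 hc1 hf
      by_cases hgi : 0 ≤ i
      · -- i ≥ 0: l1 still has an unprocessed digit at position i
        obtain ⟨p, rfl⟩ : ∃ p : Nat, i = (p : Int) := ⟨i.toNat, by omega⟩
        have hip : p < l1.length := by omega
        have ht1 : ((p : Int) + 1).toNat = p + 1 := by omega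
        have htake1 : l1.take (p + 1) = l1.take p ++ [l1[p]] := by
          rw [List.take_add_one, List.getElem?_eq_getElem hip]; rfl
        have hv1 := ordVal_range (h1 l1[p] (List.getElem_mem hip))
        have hget1 : PySem.List.pyGetD l1 (p : Int) '0' = l1[p] := by
          simp [List.getD, List.getElem?_eq_getElem hip]
        by_cases hgj : 0 ≤ j
        · obtain ⟨q, rfl⟩ : ∃ q : Nat, j = (q : Int) := ⟨j.toNat, by omega⟩
          have hjp : q < l2.length := by omega
          have ht2 : ((q : Int) + 1).toNat = q + 1 := by omega
          have htake2 : l2.take (q + 1) = l2.take q ++ [l2[q]] := by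
            rw [List.take_add_one, List.getElem?_eq_getElem hjp]; rfl
          have hv2 := ordVal_range (h2 l2[q] (List.getElem_mem hjp))
          have hget2 : PySem.List.pyGetD l2 (q : Int) '0' = l2[q] := by
            simp [List.getD, List.getElem?_eq_getElem hjp]
          have hcar := pv_carry_range (pvDigitVal l1[p] + pvDigitVal l2[q] + c) (by omega) (by omega)
          have hmod := pv_mod10_range (pvDigitVal l1[p] + pvDigitVal l2[q] + c)
          rw [ht1, ht2, htake1, htake2]
          simp only [pvAddLoopA, hgi, hgj, decide_true, Bool.true_or, Bool.or_true,
            if_true, hget1, hget2, List.reverse_append, List.reverse_cons, List.reverse_nil,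
            List.nil_append, List.singleton_append, List.map_cons, pvAddLoopB, List.map_cons]
          rw [ih ((p:Int) - 1) ((q:Int) - 1) _ _ (by omega) (by omega) hcar.1 hcar.2 (by omega)]
          rw [show ((p:Int) - 1 + 1).toNat = p by omega, show ((q:Int) - 1 + 1).toNat = q by omega]
          rw [pvChr_eq _ hmod.1]
          simp
        · have hq0 : (j + 1).toNat = 0 := by omega
          have hq0' : (j - 1 + 1).toNat = 0 := by omega
          have hcar := pv_carry_range (pvDigitVal l1[p] + c) (by omega) (by omega)
          have hmod := pv_mod10_range (pvDigitVal l1[p] + c)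
          have hcle := pv_carry_le (pvDigitVal l1[p]) c hv1.1 hv1.2 hc0 hc1
          rw [ht1, htake1, hq0]
          simp only [pvAddLoopA, hgi, hgj, decide_true, decide_false, Bool.true_or,
            Bool.false_or, if_true, hget1, if_false, Bool.false_eq_true, add_zero, zero_add, List.reverse_append, List.reverse_cons,
            List.reverse_nil, List.nil_append, List.singleton_append, List.take_zero,
            List.map_cons, List.map_nil, pvAddLoopB]
          rw [ih ((p:Int) - 1) (j - 1) _ _ (by omega) (by omega) hcar.1 hcar.2 (by omega)]
          rw [show ((p:Int) - 1 + 1).toNat = p by omega, hq0']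
          rw [pvChr_eq _ hmod.1]
          simp
      · have hp0 : (i + 1).toNat = 0 := by omega
        have hp0' : (i - 1 + 1).toNat = 0 := by omega
        by_cases hgj : 0 ≤ j
        · obtain ⟨q, rfl⟩ : ∃ q : Nat, j = (q : Int) := ⟨j.toNat, by omega⟩
          have hjp : q < l2.length := by omega
          have ht2 : ((q : Int) + 1).toNat = q + 1 := by omega
          have htake2 : l2.take (q + 1) = l2.take q ++ [l2[q]] := by
            rw [List.take_add_one, List.getElem?_eq_getElem hjp]; rfl
          have hv2 := ordVal_range (h2 l2[q] (List.getElem_mem hjp))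
          have hget2 : PySem.List.pyGetD l2 (q : Int) '0' = l2[q] := by
            simp [List.getD, List.getElem?_eq_getElem hjp]
          have hcar := pv_carry_range (pvDigitVal l2[q] + c) (by omega) (by omega)
          have hmod := pv_mod10_range (pvDigitVal l2[q] + c)
          have hcle := pv_carry_le (pvDigitVal l2[q]) c hv2.1 hv2.2 hc0 hc1
          rw [ht2, htake2, hp0]
          simp only [pvAddLoopA, hgi, hgj, decide_true, decide_false, Bool.false_or,
            Bool.true_or, Bool.or_true, if_true, hget2, if_false, Bool.false_eq_true, add_zero, zero_add, List.reverse_append, List.reverse_cons,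
            List.reverse_nil, List.nil_append, List.singleton_append, List.take_zero,
            List.map_cons, List.map_nil, pvAddLoopB]
          rw [ih (i - 1) ((q:Int) - 1) _ _ (by omega) (by omega) hcar.1 hcar.2 (by omega)]
          rw [show ((q:Int) - 1 + 1).toNat = q by omega, hp0']
          rw [pvChr_eq _ hmod.1]
          simp
        · by_cases hgc : 0 < c
          · have hc1' : c = 1 := by omega
            subst hc1'
            have hcar : PySem.Int.floordiv 1 10 = 0 := by decide
            have hmod : PySem.Int.mod 1 10 = 1 := by decide
            rw [hp0]
            have hq0 : (j + 1).toNat = 0 := by omega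
            rw [hq0]
            simp only [pvAddLoopA, hgi, hgj, hgc, decide_true, decide_false, Bool.false_or,
              Bool.or_true, if_true, if_false, Bool.false_eq_true, add_zero, zero_add,
              List.take_zero, List.reverse_nil, List.map_nil, pvAddLoopB, hcar, hmod]
            rw [ih (i - 1) (j - 1) 0 _ (by omega) (by omega) le_rfl (by norm_num) (by omega)]
            rw [hp0', show (j - 1 + 1).toNat = 0 by omega]
            simp [pvAddLoopB, pvChr]
          · have hc0' : c = 0 := by omega
            subst hc0'
            rw [hp0, show (j + 1).toNat = 0 by omega]
            simp [pvAddLoopA, hgi, hgj, pvAddLoopB]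

theorem addA_eq_addB (l1 l2 : List Char)
    (h1 : ∀ ch ∈ l1, ch.isDigit = true) (h2 : ∀ ch ∈ l2, ch.isDigit = true) :
    pvAddA l1 l2 = pvAddB l1 l2 := by
  unfold pvAddA pvAddB
  rw [addLoopAB l1 l2 h1 h2 (l1.length + l2.length + 40) ((l1.length : Int) - 1)
      ((l2.length : Int) - 1) 0 [] (by omega) (by omega) le_rfl (by norm_num) (by omega)]
  rw [show ((l1.length : Int) - 1 + 1).toNat = l1.length by omega,
      show ((l2.length : Int) - 1 + 1).toNat = l2.length by omega]
  simp [List.map_reverse]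

theorem checkA_eq_checkB (f : Nat) : ∀ (a b rem : List Char),
    (∀ ch ∈ a, ch.isDigit = true) → (∀ ch ∈ b, ch.isDigit = true) →
    pvCheckA f a b rem = pvCheckB f a b rem := by
  induction f with
  | zero => intro a b rem _ _; rfl
  | succ f ih =>
      intro a b rem ha hb
      simp only [pvCheckA, pvCheckB]
      by_cases hg : ((decide (1 < a.length) && (a.head? == some '0'))
          || (decide (1 < b.length) && (b.head? == some '0'))) = true
      · simp [hg]
      · simp only [hg, if_false, Bool.false_eq_true]
        rw [addA_eq_addB a b ha hb]
        have hsd := addB_digits a b ha hb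
        set s := pvAddB a b with hs
        have hslice : PySem.List.slice rem (some (s.length : Int)) none = rem.drop s.length :=
          PySem.List.slice_from_natCast rem s.length
        by_cases hpre : s <+: rem
        · have htake : rem.take s.length = s := (List.prefix_iff_eq_take.mp hpre).symm
          have hsw : PySem.Chars.startswith rem s = true := (PySem.Chars.startswith_iff rem s).mpr hpre
          by_cases heq : rem = s
          · subst heq
            simp [List.drop_length, htake]
          · have hdrop : rem.drop s.length ≠ [] := by
              intro hnil
              exact heq (by rw [← List.take_append_drop s.length rem, hnil, htake, List.append_nil])
            rw [if_neg heq, hsw, if_pos htake, hslice]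
            simp only [Bool.not_true, Bool.false_eq_true, if_false, if_neg hdrop]
            exact ih b s (rem.drop s.length) hb hsd
        · have htake : rem.take s.length ≠ s := fun h => hpre (List.prefix_iff_eq_take.mpr h.symm)
          have hsw : PySem.Chars.startswith rem s = false := by
            rw [← Bool.not_eq_true]; intro h; exact hpre ((PySem.Chars.startswith_iff rem s).mp h)
          have heq : rem ≠ s := fun h => hpre (h ▸ List.prefix_refl rem)
          simp [heq, hsw, htake]

-- ===== VERDICT =====
theorem check_spec : Claim_equal_check := by
  intro num1 num2 remaining _ hpre
  unfold Spec_check check check_alt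
  rcases hpre with hg | ⟨h1, h2, _⟩
  · -- leading-zero guard fires: both sides return False at once
    have : ((decide (1 < num1.toList.length) && (num1.toList.head? == some '0'))
        || (decide (1 < num2.toList.length) && (num2.toList.head? == some '0'))) = true := by
      rcases hg with ⟨h, h'⟩ | ⟨h, h'⟩
      · have hl : 1 < num1.length := by simpa using h
        simp [hl, h']
      · have hl : 1 < num2.length := by simpa using h
        simp [hl, h']
    simp only [pvCheckA, pvCheckB, this, if_true]
  · exact checkA_eq_checkB _ _ _ _ (by simpa [List.all_eq_true] using h1)
      (by simpa [List.all_eq_true] using h2)
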